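-- pv_equiv track=rewrite | github.com/gabefoley/ancestralcost | ancestralcost/graph.py | get_adjaceny_dict
-- ===== SOURCE A (Python) =====
-- from collections import defaultdict
--
-- def get_adjaceny_dict(seqs):
--
--     adj_dict = defaultdict(set)
--
--     for seq in seqs:
--         prev_node = -1
--         for pos, sym in enumerate(seq):
--             curr_node = pos
--             if sym != "-":
--                 adj_dict[prev_node].add(curr_node)
--                 prev_node = pos
--
--     return adj_dict
-- ===== SOURCE B (Python) =====
-- from collections import defaultdict
--
-- def get_adjaceny_dict(seqs):
--     adj_dict = defaultdict(set)
--     for seq in seqs: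
--         for curr, sym in enumerate(seq):
--             if sym != "-":
--                 # recompute the predecessor of curr from scratch: the last
--                 # non-gap position strictly before curr, or -1 if none
--                 prev = -1
--                 for k in range(curr):
--                     if seq[k] != "-":
--                         prev = k
--                 adj_dict[prev].add(curr)
--     return adj_dict
-- ===== Notes on version B (the rewrite author's own statement) =====
-- stated objective: alternative
-- what changed: Replaces A's single-pass running prev_node state machine by a stateless brute-force algorithm: for each non-gap position it recomputes its predecessor from scratch with an inner scan over all earlier positions.
import Mathlib
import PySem

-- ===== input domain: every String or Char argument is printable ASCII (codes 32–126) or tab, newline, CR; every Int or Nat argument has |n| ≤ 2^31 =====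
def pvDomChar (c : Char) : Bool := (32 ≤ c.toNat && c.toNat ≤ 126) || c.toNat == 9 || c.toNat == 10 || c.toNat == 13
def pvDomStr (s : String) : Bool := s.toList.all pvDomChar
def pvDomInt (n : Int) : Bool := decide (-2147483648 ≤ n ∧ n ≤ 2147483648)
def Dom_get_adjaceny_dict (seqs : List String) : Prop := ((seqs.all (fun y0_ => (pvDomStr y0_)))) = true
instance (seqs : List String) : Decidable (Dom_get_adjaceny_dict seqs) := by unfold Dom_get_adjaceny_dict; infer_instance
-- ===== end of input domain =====

-- B replaces A's single-pass running prev_node state machine by a stateless brute-force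
-- pass: for each non-gap position it recomputes the predecessor from scratch by an inner
-- scan over all earlier positions (different algorithm, not faster).

-- ===== PORT A =====
-- running-state fold: state = (dict so far, prev_node); one pass over enumerate(seq)
def get_adjaceny_dict (seqs : List String) : List (Int × List Int) :=
  (seqs.foldl
    (fun adj seq =>
      ((PySem.List.enumerate seq.toList).foldl
        (fun st p =>
          if p.2 != '-' then
            (st.1.modify st.2 PySem.Set.empty (fun s => PySem.Set.add s p.1), p.1)
          else st)
        (adj, (-1 : Int))).1)
    PySem.Dict.empty).items

-- ===== PORT B =====
-- inner loop of Source B: prev = -1; for k in range(curr): if seq[k] != '-': prev = k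
-- (seq[k] is always in range here since 0 ≤ k < curr ≤ len(seq), so the total pyGetD is exact)
def pvPrevScan (cs : List Char) (curr : Int) : Int :=
  (PySem.List.pyRange 0 curr 1).foldl
    (fun prev k => if PySem.List.pyGetD cs k '-' != '-' then k else prev) (-1)

def get_adjaceny_dict_alt (seqs : List String) : List (Int × List Int) :=
  (seqs.foldl
    (fun adj seq =>
      (PySem.List.enumerate seq.toList).foldl
        (fun d p =>
          if p.2 != '-' then
            d.modify (pvPrevScan seq.toList p.1) PySem.Set.empty (fun s => PySem.Set.add s p.1)
          else d)
        adj)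
    PySem.Dict.empty).items

-- ===== PRECONDITION & SPEC =====
def Spec_get_adjaceny_dict (seqs : List String) (out : List (Int × List Int)) : Prop := out = get_adjaceny_dict_alt seqs
instance (seqs : List String) (out : List (Int × List Int)) : Decidable (Spec_get_adjaceny_dict seqs out) := by unfold Spec_get_adjaceny_dict; infer_instance

-- ===== CLAIM (what is proved, stated in full; the proofs are below) =====
def Claim_equal_get_adjaceny_dict : Prop := ∀ (seqs : List String), Dom_get_adjaceny_dict seqs → Spec_get_adjaceny_dict seqs (get_adjaceny_dict seqs)

-- ===== LEMMAS AND PROOFS =====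

-- scanning no earlier positions gives -1
theorem pvPrevScan_zero (cs : List Char) : pvPrevScan cs 0 = -1 := by
  simp [pvPrevScan, PySem.List.pyRange_one_eq_nil le_rfl]

-- extending the scanned prefix by one position
theorem pvPrevScan_succ (cs : List Char) (n : Nat) :
    pvPrevScan cs ((n : Int) + 1)
      = if PySem.List.pyGetD cs (n : Int) '-' != '-' then (n : Int) else pvPrevScan cs (n : Int) := by
  unfold pvPrevScan
  rw [PySem.List.pyRange_one_succ_right (Int.natCast_nonneg n)]
  simp [List.foldl_append]

-- core: A's running-(dict, prev) fold over the suffix starting at n, entered with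
-- prev = pvPrevScan cs n, produces the same dict as B's stateless fold over that suffix.
theorem pv_inner_eq (cs : List Char) :
    ∀ (rest : List Char) (n : Nat), rest = cs.drop n →
    ∀ d : PySem.Dict Int (PySem.Set Int),
    ((PySem.List.enumerate rest (n : Int)).foldl
      (fun st p =>
        if p.2 != '-' then
          (st.1.modify st.2 PySem.Set.empty (fun s => PySem.Set.add s p.1), p.1)
        else st)
      (d, pvPrevScan cs (n : Int))).1
    = (PySem.List.enumerate rest (n : Int)).foldl
      (fun d p =>
        if p.2 != '-' then
          d.modify (pvPrevScan cs p.1) PySem.Set.empty (fun s => PySem.Set.add s p.1)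
        else d)
      d := by
  intro rest
  induction rest with
  | nil => intro n _ d; simp [PySem.List.enumerate]
  | cons r rest' ih =>
    intro n hdrop d
    have hn : n < cs.length := by
      by_contra h
      rw [List.drop_eq_nil_of_le (by omega)] at hdrop
      exact List.cons_ne_nil _ _ hdrop
    have hget : cs[n]? = some r := by
      have h0 : (cs.drop n)[0]? = cs[n]? := by simp
      rw [← hdrop] at h0
      simpa using h0.symm
    have hgetD : PySem.List.pyGetD cs (n : Int) '-' = r := by
      simp [PySem.List.pyGetD_natCast, List.getD, hget]
    have hrest' : rest' = cs.drop (n + 1) := by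
      have ht : (cs.drop n).tail = cs.drop (n + 1) := by rw [List.tail_drop]
      rw [← hdrop] at ht
      simpa using ht
    have hsucc := pvPrevScan_succ cs n
    rw [hgetD] at hsucc
    have hcast : (n : Int) + 1 = ((n + 1 : Nat) : Int) := by push_cast; ring
    rw [PySem.List.enumerate_cons]
    simp only [List.foldl_cons]
    by_cases hr : r = '-'
    · have hprev : pvPrevScan cs ((n + 1 : Nat) : Int) = pvPrevScan cs (n : Int) := by
        rw [← hcast, hsucc]; simp [hr]
      rw [if_neg (by simp [hr]), if_neg (by simp [hr]), hcast, ← hprev]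
      exact ih (n + 1) hrest' d
    · have hprev : pvPrevScan cs ((n + 1 : Nat) : Int) = (n : Int) := by
        rw [← hcast, hsucc]; simp [hr]
      rw [if_pos (by simp [hr]), if_pos (by simp [hr]), hcast]
      have h2 := ih (n + 1) hrest'
        (d.modify (pvPrevScan cs (n : Int)) PySem.Set.empty (fun s => PySem.Set.add s (n : Int)))
      rw [hprev] at h2
      exact h2

-- ===== VERDICT (by name: the statement is the Claim_ definition above) =====
theorem get_adjaceny_dict_spec : Claim_equal_get_adjaceny_dict := by
  intro seqs _
  unfold Spec_get_adjaceny_dict get_adjaceny_dict get_adjaceny_dict_alt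
  congr 1
  apply PySem.List.foldl_congr_mem
  intro adj seq _
  have h := pv_inner_eq seq.toList seq.toList 0 (by simp) adj
  simpa [pvPrevScan_zero] using h
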